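-- pv_equiv track=rewrite | github.com/AngheloAlf/Programacion-CIAC-2019 | intensivos S2/Fase 1/05/Code/juegos.py | crear_diccionario
-- ===== SOURCE A (Python) =====
-- def total_jugadores(juegos):
--     lista=list()
--     for _,(_,_,jugadores) in juegos.items():
--         for jugador in jugadores:
--             if jugador not in lista:
--                 lista.append(jugador)
--     return lista
--
-- def cantidad(jugador,juegos):
--     contador=0
--     for _,_,lista in juegos.values():
--         if jugador in lista:
--             contador+=1
--     return contador
--
-- def conocidos(jugador,juegos):
--     amigos=[]
--     for _,(_,_,lista) in juegos.items():
--         if jugador in lista: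
--             for amigo in lista:
--                 if amigo!=jugador and amigo not in amigos:
--                     amigos.append(amigo)
--     return amigos
--
-- def preferencia(jugador,juegos):
--     diccionario={}
--     for _,(_,categorias,jugadores) in juegos.items():
--         if jugador in jugadores:
--             for categoria in categorias:
--                 if categoria not in diccionario:
--                     diccionario[categoria]=0
--                 diccionario[categoria]+=1
--     maximo=-float('inf')
--     for categoria,cantidad in diccionario.items():
--         if cantidad>maximo:
--             preferido=categoria
--             maximo=cantidad
--     return preferido
--
-- def crear_diccionario(juegos):
--     jugadores=total_jugadores(juegos)
--     nuevo={}
--     for jugador in jugadores: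
--         prefiere=preferencia(jugador,juegos)
--         conoce=conocidos(jugador,juegos)
--         tiene=cantidad(jugador,juegos)
--         nuevo[jugador]=(prefiere,conoce,tiene)
--     return nuevo
-- ===== SOURCE B (Python) =====
-- def crear_diccionario(juegos):
--     # One pass over the games: aggregate per-player game count, acquaintances
--     # and category counts as we go, instead of re-scanning all games per player.
--     cuenta = {}   # jugador -> number of games he plays (keys in first-seen order)
--     amigos = {}   # jugador -> acquaintances, in order of first encounter
--     prefs = {}    # jugador -> {categoria: count}
--     for _, (_, categorias, jugadores) in juegos.items():
--         for j in dict.fromkeys(jugadores):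
--             cuenta[j] = cuenta.get(j, 0) + 1
--             pd = prefs.get(j, {})
--             for c in categorias:
--                 pd[c] = pd.get(c, 0) + 1
--             prefs[j] = pd
--             am = amigos.get(j, [])
--             for otro in jugadores:
--                 if otro != j and otro not in am:
--                     am.append(otro)
--             amigos[j] = am
--     return {j: (max(prefs[j], key=lambda c: prefs[j][c]), amigos[j], cuenta[j])
--             for j in cuenta}
-- ===== Notes on version B (the rewrite author's own statement) =====
-- stated objective: faster
-- what changed: Instead of re-scanning the whole game dict once per player (separate preferencia/conocidos/cantidad passes for each player), B makes a single pass over the games, aggregating per-player game counts, acquaintance lists and category counters in dictionaries, then reads each player's answer off the aggregates; Pre_ excludes the inputs where some player occurs only in games with an empty category list, on which A raises UnboundLocalError and B raises ValueError.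
import Mathlib
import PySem

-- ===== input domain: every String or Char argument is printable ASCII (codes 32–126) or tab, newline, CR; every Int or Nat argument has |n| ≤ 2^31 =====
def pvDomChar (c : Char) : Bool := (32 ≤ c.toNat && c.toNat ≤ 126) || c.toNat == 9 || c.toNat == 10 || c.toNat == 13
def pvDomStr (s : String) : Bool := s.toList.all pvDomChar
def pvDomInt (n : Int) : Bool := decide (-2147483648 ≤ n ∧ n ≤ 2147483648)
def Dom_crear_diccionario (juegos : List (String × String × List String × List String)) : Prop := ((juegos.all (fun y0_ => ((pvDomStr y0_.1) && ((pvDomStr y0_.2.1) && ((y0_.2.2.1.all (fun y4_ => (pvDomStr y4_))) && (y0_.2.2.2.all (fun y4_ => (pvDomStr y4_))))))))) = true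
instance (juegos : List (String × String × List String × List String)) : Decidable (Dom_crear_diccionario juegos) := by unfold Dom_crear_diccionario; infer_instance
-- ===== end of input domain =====

-- B replaces A's per-player re-scans of the whole game dict by ONE aggregating pass
-- over the games (objective: faster, asymptotically fewer dict scans).

-- ===== PORT A =====
-- In each helper, `gs` is the items list of the juegos dict; a game g is
-- (key, (name, categorias, jugadores)): g.2.2.1 = categorias, g.2.2.2 = jugadores.

def pvA_total_jugadores (gs : List (String × String × List String × List String)) : List String :=
  gs.foldl (fun lista g =>
    g.2.2.2.foldl (fun lista jugador =>
      if jugador ∈ lista then lista else lista ++ [jugador]) lista) []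

def pvA_cantidad (jugador : String)
    (gs : List (String × String × List String × List String)) : Int :=
  gs.foldl (fun contador g => if jugador ∈ g.2.2.2 then contador + 1 else contador) 0

def pvA_conocidos (jugador : String)
    (gs : List (String × String × List String × List String)) : List String :=
  gs.foldl (fun amigos g =>
    if jugador ∈ g.2.2.2 then
      g.2.2.2.foldl (fun amigos amigo =>
        if amigo ≠ jugador ∧ amigo ∉ amigos then amigos ++ [amigo] else amigos) amigos
    else amigos) []

-- `diccionario[c] = 0 if absent; diccionario[c] += 1` is Dict.modify c 0 (· + 1).
-- maximo = -float('inf') is modelled as `none` (smaller than every count); a still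
-- unbound `preferido` is `none` (Python raises UnboundLocalError there — excluded by Pre_).
def pvA_preferencia (jugador : String)
    (gs : List (String × String × List String × List String)) : String :=
  let diccionario : PySem.Dict String Int :=
    gs.foldl (fun d g =>
      if jugador ∈ g.2.2.2 then
        g.2.2.1.foldl (fun d categoria => d.modify categoria 0 (· + 1)) d
      else d) PySem.Dict.empty
  let pick := diccionario.items.foldl
    (fun (st : Option String × Option Int) kv =>
      match st.2 with
      | none => (some kv.1, some kv.2)
      | some maximo => if kv.2 > maximo then (some kv.1, some kv.2) else st)
    (none, none)
  pick.1.getD ""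

def crear_diccionario (juegos : List (String × String × List String × List String)) :
    List (String × String × List String × Int) :=
  let gs := (PySem.Dict.ofList juegos).items
  let jugadores := pvA_total_jugadores gs
  (jugadores.foldl (fun nuevo jugador =>
      nuevo.insert jugador
        (pvA_preferencia jugador gs, pvA_conocidos jugador gs, pvA_cantidad jugador gs))
    (PySem.Dict.empty : PySem.Dict String (String × List String × Int))).items

-- ===== PORT B =====

-- inner loop 'for otro in jugadores: if otro != j and otro not in am: am.append(otro)'
def pvB_amigosGame (j : String) (jugadores : List String) (am : List String) : List String :=
  jugadores.foldl (fun am otro => if otro ≠ j ∧ otro ∉ am then am ++ [otro] else am) am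

-- inner loop 'for c in categorias: pd[c] = pd.get(c, 0) + 1'
def pvB_prefsGame (categorias : List String) (pd : PySem.Dict String Int) : PySem.Dict String Int :=
  categorias.foldl (fun pd c => pd.insert c (pd.getD c 0 + 1)) pd

-- one game of the aggregation pass; state = (cuenta, amigos, prefs)
def pvB_paso
    (st : PySem.Dict String Int × PySem.Dict String (List String) ×
          PySem.Dict String (PySem.Dict String Int))
    (g : String × String × List String × List String) :
    PySem.Dict String Int × PySem.Dict String (List String) ×
      PySem.Dict String (PySem.Dict String Int) :=
  (PySem.List.dedup g.2.2.2).foldl (fun st j =>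
    (st.1.insert j (st.1.getD j 0 + 1),
     st.2.1.insert j (pvB_amigosGame j g.2.2.2 (st.2.1.getD j [])),
     st.2.2.insert j (pvB_prefsGame g.2.2.1 (st.2.2.getD j PySem.Dict.empty)))) st

-- max(prefs[j], key=lambda c: prefs[j][c]); empty dict (ValueError) is excluded by Pre_
def pvB_mejor (pd : PySem.Dict String Int) : String :=
  (PySem.List.max? pd.keys (fun c => pd.getD c 0)).getD ""

def crear_diccionario_alt (juegos : List (String × String × List String × List String)) :
    List (String × String × List String × Int) :=
  let st := (PySem.Dict.ofList juegos).items.foldl pvB_paso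
    (PySem.Dict.empty, PySem.Dict.empty, PySem.Dict.empty)
  (st.1.keys.foldl (fun nuevo j =>
      nuevo.insert j
        (pvB_mejor (st.2.2.getD j PySem.Dict.empty), st.2.1.getD j [], st.1.getD j 0))
    (PySem.Dict.empty : PySem.Dict String (String × List String × Int))).items

-- ===== PRECONDITION & SPEC =====
-- Pre_ excludes exactly the inputs on which the Python A raises: whenever some player
-- occurs only in games whose category list is empty, A's preferencia never assigns
-- `preferido` and raises UnboundLocalError (B raises ValueError there too).
def Pre_crear_diccionario (juegos : List (String × String × List String × List String)) : Prop :=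
  ∀ g ∈ (PySem.Dict.ofList juegos).items, ∀ j ∈ g.2.2.2,
    ∃ g' ∈ (PySem.Dict.ofList juegos).items, j ∈ g'.2.2.2 ∧ g'.2.2.1 ≠ []
instance (juegos : List (String × String × List String × List String)) :
    Decidable (Pre_crear_diccionario juegos) := by unfold Pre_crear_diccionario; infer_instance

def pvWitness_crear_diccionario : (List (String × String × List String × List String)) :=
  [("g1", ("Catan", ["estrategia"], ["ana", "beto"]))]

def Spec_crear_diccionario (juegos : List (String × String × List String × List String))
    (out : List (String × String × List String × Int)) : Prop :=
  out = crear_diccionario_alt juegos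
instance (juegos : List (String × String × List String × List String))
    (out : List (String × String × List String × Int)) :
    Decidable (Spec_crear_diccionario juegos out) := by unfold Spec_crear_diccionario; infer_instance

-- ===== CLAIM (what is proved, stated in full; the proofs are below) =====
def Claim_equal_crear_diccionario : Prop :=
  ∀ (juegos : List (String × String × List String × List String)),
    Dom_crear_diccionario juegos → Pre_crear_diccionario juegos →
      Spec_crear_diccionario juegos (crear_diccionario juegos)

-- ===== LEMMAS AND PROOFS =====

-- the three independent aggregations hidden in pvB_paso
def pvFoldC (gs : List (String × String × List String × List String))
    (d : PySem.Dict String Int) : PySem.Dict String Int :=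
  gs.foldl (fun d g =>
    (PySem.List.dedup g.2.2.2).foldl (fun d j => d.insert j (d.getD j 0 + 1)) d) d

def pvFoldA (gs : List (String × String × List String × List String))
    (d : PySem.Dict String (List String)) : PySem.Dict String (List String) :=
  gs.foldl (fun d g =>
    (PySem.List.dedup g.2.2.2).foldl
      (fun d j => d.insert j (pvB_amigosGame j g.2.2.2 (d.getD j []))) d) d

def pvFoldP (gs : List (String × String × List String × List String))
    (d : PySem.Dict String (PySem.Dict String Int)) : PySem.Dict String (PySem.Dict String Int) :=
  gs.foldl (fun d g =>
    (PySem.List.dedup g.2.2.2).foldl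
      (fun d j => d.insert j (pvB_prefsGame g.2.2.1 (d.getD j PySem.Dict.empty))) d) d

-- a loop with three independent accumulators is three loops
theorem pv_triple {α β γ δ : Type} (l : List δ) (f : α → δ → α) (g : β → δ → β) (h : γ → δ → γ)
    (a : α) (b : β) (c : γ) :
    l.foldl (fun st x => (f st.1 x, g st.2.1 x, h st.2.2 x)) (a, b, c)
      = (l.foldl f a, l.foldl g b, l.foldl h c) := by
  induction l generalizing a b c with
  | nil => rfl
  | cons x xs ih => simpa using ih (f a x) (g b x) (h c x)

theorem pvB_split (gs : List (String × String × List String × List String))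
    (st : PySem.Dict String Int × PySem.Dict String (List String) ×
          PySem.Dict String (PySem.Dict String Int)) :
    gs.foldl pvB_paso st = (pvFoldC gs st.1, pvFoldA gs st.2.1, pvFoldP gs st.2.2) := by
  induction gs generalizing st with
  | nil => rfl
  | cons g gs ih =>
    rw [List.foldl_cons, ih]
    have hp : pvB_paso st g
        = ((PySem.List.dedup g.2.2.2).foldl (fun d j => d.insert j (d.getD j 0 + 1)) st.1,
           (PySem.List.dedup g.2.2.2).foldl
             (fun d j => d.insert j (pvB_amigosGame j g.2.2.2 (d.getD j []))) st.2.1,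
           (PySem.List.dedup g.2.2.2).foldl
             (fun d j => d.insert j (pvB_prefsGame g.2.2.1 (d.getD j PySem.Dict.empty))) st.2.2) := by
      obtain ⟨a, b, c⟩ := st
      simp only [pvB_paso]
      exact pv_triple (PySem.List.dedup g.2.2.2)
        (fun d j => d.insert j (d.getD j 0 + 1))
        (fun d j => d.insert j (pvB_amigosGame j g.2.2.2 (d.getD j [])))
        (fun d j => d.insert j (pvB_prefsGame g.2.2.1 (d.getD j PySem.Dict.empty))) a b c
    rw [hp]
    rfl

-- Set facts feeding the key-order argument
theorem pv_update_add (s t : PySem.Set String) (x : String) :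
    PySem.Set.update s (PySem.Set.add t x) = PySem.Set.add (PySem.Set.update s t) x := by
  by_cases hx : x ∈ t
  · rw [PySem.Set.add_of_mem hx, PySem.Set.add_of_mem]
    exact (PySem.Set.mem_update s t x).mpr (Or.inr hx)
  · rw [PySem.Set.add_of_not_mem hx, PySem.Set.update_append, PySem.Set.update_cons,
      PySem.Set.update_nil]

theorem pv_update_update (xs : List String) (s t : PySem.Set String) :
    PySem.Set.update s (PySem.Set.update t xs) = PySem.Set.update (PySem.Set.update s t) xs := by
  induction xs generalizing t with
  | nil => rw [PySem.Set.update_nil, PySem.Set.update_nil]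
  | cons x xs ih =>
    rw [PySem.Set.update_cons t, ih (t.add x), pv_update_add, ← PySem.Set.update_cons]

theorem pv_update_dedup (s : PySem.Set String) (xs : List String) :
    PySem.Set.update s (PySem.List.dedup xs) = PySem.Set.update s xs := by
  rw [PySem.List.dedup_eq_ofList, ← PySem.Set.update_nil_left, pv_update_update,
    PySem.Set.update_nil]

theorem pv_keysC (gs : List (String × String × List String × List String))
    (d : PySem.Dict String Int) :
    (pvFoldC gs d).keys = gs.foldl (fun ks g => PySem.Set.update ks g.2.2.2) d.keys := by
  induction gs generalizing d with
  | nil => rfl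
  | cons g t ih =>
    simp only [pvFoldC, List.foldl_cons] at *
    rw [ih, PySem.Dict.keys_foldl_insert, pv_update_dedup]

theorem pv_totalEq (gs : List (String × String × List String × List String)) :
    pvA_total_jugadores gs = gs.foldl (fun ks g => PySem.Set.update ks g.2.2.2) [] := by
  simp only [pvA_total_jugadores]
  refine PySem.List.foldl_congr_mem gs _ _ [] ?_
  intro acc g _
  simp only [PySem.Set.update]
  refine PySem.List.foldl_congr_mem g.2.2.2 _ _ acc ?_
  intro am x _
  by_cases hx : x ∈ am
  · rw [if_pos hx, PySem.Set.add_of_mem hx]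
  · rw [if_neg hx, PySem.Set.add_of_not_mem hx]

-- inserts keyed outside l do not move getD
theorem pv_getD_foldl_insert_not_mem {ν : Type} (l : List String) (f : String → ν → ν)
    (d : PySem.Dict String ν) (dflt : ν) (j : String) (hj : j ∉ l) :
    (l.foldl (fun d k => d.insert k (f k (d.getD k dflt))) d).getD j dflt = d.getD j dflt := by
  induction l generalizing d with
  | nil => rfl
  | cons k t ih =>
    rw [List.foldl_cons, ih _ (fun h => hj (List.mem_cons_of_mem _ h)),
      PySem.Dict.getD_insert_of_ne _ _ _ (by rintro rfl; exact hj List.mem_cons_self)]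

-- a fold of read-modify-write inserts over a Nodup key list, read at one key
theorem pv_getD_foldl_insert_fun {ν : Type} (l : List String) (hl : l.Nodup)
    (f : String → ν → ν) (d : PySem.Dict String ν) (dflt : ν) (j : String) :
    (l.foldl (fun d k => d.insert k (f k (d.getD k dflt))) d).getD j dflt
      = if j ∈ l then f j (d.getD j dflt) else d.getD j dflt := by
  induction l generalizing d with
  | nil => simp
  | cons k t ih =>
    rw [List.foldl_cons]
    by_cases hk : j = k
    · subst hk
      have hjt : j ∉ t := (List.nodup_cons.mp hl).1
      rw [pv_getD_foldl_insert_not_mem _ _ _ _ _ hjt, PySem.Dict.getD_insert_self,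
        if_pos List.mem_cons_self]
    · rw [ih (List.nodup_cons.mp hl).2, PySem.Dict.getD_insert_of_ne _ _ _ hk]
      simp [List.mem_cons, hk]

theorem pv_cntEq (gs : List (String × String × List String × List String))
    (d : PySem.Dict String Int) (j : String) :
    (pvFoldC gs d).getD j 0
      = gs.foldl (fun c g => if j ∈ g.2.2.2 then c + 1 else c) (d.getD j 0) := by
  induction gs generalizing d with
  | nil => rfl
  | cons g t ih =>
    simp only [pvFoldC, List.foldl_cons] at *
    rw [ih]
    have h := pv_getD_foldl_insert_fun (PySem.List.dedup g.2.2.2)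
      (PySem.List.nodup_dedup _) (fun _ v => v + 1) d 0 j
    simp only [PySem.List.mem_dedup] at h
    rw [h]

theorem pv_amiEq (gs : List (String × String × List String × List String))
    (d : PySem.Dict String (List String)) (j : String) :
    (pvFoldA gs d).getD j []
      = gs.foldl (fun am g => if j ∈ g.2.2.2 then pvB_amigosGame j g.2.2.2 am else am)
          (d.getD j []) := by
  induction gs generalizing d with
  | nil => rfl
  | cons g t ih =>
    simp only [pvFoldA, List.foldl_cons] at *
    rw [ih]
    have h := pv_getD_foldl_insert_fun (PySem.List.dedup g.2.2.2)
      (PySem.List.nodup_dedup _) (fun k v => pvB_amigosGame k g.2.2.2 v) d [] j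
    simp only [PySem.List.mem_dedup] at h
    rw [h]

theorem pv_prfEq (gs : List (String × String × List String × List String))
    (d : PySem.Dict String (PySem.Dict String Int)) (j : String) :
    (pvFoldP gs d).getD j PySem.Dict.empty
      = gs.foldl (fun pd g => if j ∈ g.2.2.2 then pvB_prefsGame g.2.2.1 pd else pd)
          (d.getD j PySem.Dict.empty) := by
  induction gs generalizing d with
  | nil => rfl
  | cons g t ih =>
    simp only [pvFoldP, List.foldl_cons] at *
    rw [ih]
    have h := pv_getD_foldl_insert_fun (PySem.List.dedup g.2.2.2)
      (PySem.List.nodup_dedup _) (fun _ v => pvB_prefsGame g.2.2.1 v) d PySem.Dict.empty j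
    simp only [PySem.List.mem_dedup] at h
    rw [h]

theorem pv_nodupP (gs : List (String × String × List String × List String)) (j : String)
    (pd : PySem.Dict String Int) (h : pd.keys.Nodup) :
    (gs.foldl (fun pd g => if j ∈ g.2.2.2 then pvB_prefsGame g.2.2.1 pd else pd) pd).keys.Nodup := by
  induction gs generalizing pd with
  | nil => exact h
  | cons g t ih =>
    rw [List.foldl_cons]
    by_cases hg : j ∈ g.2.2.2
    · rw [if_pos hg]
      exact ih _ (PySem.Dict.nodup_keys_foldl_insert _ _ _ h)
    · rw [if_neg hg]
      exact ih _ h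

-- A's running strict-max scan is Python's max (first maximal element)
theorem pv_pickAux (key : String → Int) (t : List String) (m : String) :
    t.foldl (fun (st : Option String × Option Int) k =>
        match st.2 with
        | none => (some k, some (key k))
        | some maximo => if key k > maximo then (some k, some (key k)) else st)
      (some m, some (key m))
      = (some (t.foldl (fun b k => if key b < key k then k else b) m),
         some (key (t.foldl (fun b k => if key b < key k then k else b) m))) := by
  induction t generalizing m with
  | nil => rfl
  | cons x t ih =>
    rw [List.foldl_cons, List.foldl_cons]
    by_cases h : key m < key x
    · simp only [gt_iff_lt, h, if_pos]
      exact ih x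
    · simp only [gt_iff_lt, h, ite_false]
      exact ih m

theorem pv_max?_cons (key : String → Int) : ∀ (t : List String) (x : String),
    PySem.List.max? (x :: t) key
      = some (t.foldl (fun b k => if key b < key k then k else b) x) := by
  intro t
  induction t with
  | nil => intro x; rfl
  | cons y t ih =>
    intro x
    have hstep : PySem.List.max? (x :: y :: t) key
        = PySem.List.max? ((if key x < key y then y else x) :: t) key := by
      simp only [PySem.List.max?, List.foldl_cons]
      by_cases h : key x < key y <;> simp [h]
    rw [hstep, ih]
    simp [List.foldl_cons]

theorem pv_pickEq (key : String → Int) (l : List String) :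
    (l.foldl (fun (st : Option String × Option Int) k =>
        match st.2 with
        | none => (some k, some (key k))
        | some maximo => if key k > maximo then (some k, some (key k)) else st)
      (none, none)).1
      = PySem.List.max? l key := by
  cases l with
  | nil => rfl
  | cons x t =>
    rw [List.foldl_cons]
    show (t.foldl _ (some x, some (key x))).1 = _
    rw [pv_pickAux, pv_max?_cons]

theorem pv_prefEq (gs : List (String × String × List String × List String)) (j : String) :
    pvA_preferencia j gs = pvB_mejor ((pvFoldP gs PySem.Dict.empty).getD j PySem.Dict.empty) := by
  have hpd : (pvFoldP gs PySem.Dict.empty).getD j PySem.Dict.empty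
      = gs.foldl (fun pd g => if j ∈ g.2.2.2 then pvB_prefsGame g.2.2.1 pd else pd)
          PySem.Dict.empty := by
    rw [pv_prfEq, PySem.Dict.getD_empty]
  have hnd : ((pvFoldP gs PySem.Dict.empty).getD j PySem.Dict.empty).keys.Nodup := by
    rw [hpd]
    exact pv_nodupP gs j PySem.Dict.empty PySem.Dict.nodup_keys_empty
  set pd := (pvFoldP gs PySem.Dict.empty).getD j PySem.Dict.empty with hpddef
  have hdic : pvA_preferencia j gs
      = (pd.items.foldl
          (fun (st : Option String × Option Int) kv =>
            match st.2 with
            | none => (some kv.1, some kv.2)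
            | some maximo => if kv.2 > maximo then (some kv.1, some kv.2) else st)
          (none, none)).1.getD "" := by
    rw [hpd]
    rfl
  rw [hdic, PySem.Dict.items_eq_map_keys pd hnd 0, List.foldl_map]
  have := pv_pickEq (fun c => pd.getD c 0) pd.keys
  simp only [] at this ⊢
  rw [this]
  rfl

-- ===== VERDICT (by name: the statement is the Claim_ definition above) =====
theorem crear_diccionario_spec : Claim_equal_crear_diccionario := by
  intro juegos _hdom _hpre
  show crear_diccionario juegos = crear_diccionario_alt juegos
  simp only [crear_diccionario, crear_diccionario_alt]
  rw [pvB_split]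
  have hK : (pvFoldC (PySem.Dict.ofList juegos).items PySem.Dict.empty).keys
      = pvA_total_jugadores (PySem.Dict.ofList juegos).items := by
    rw [pv_keysC, pv_totalEq, PySem.Dict.keys_empty]
  simp only []
  rw [hK]
  congr 1
  refine PySem.List.foldl_congr_mem _ _ _ _ ?_
  intro acc j _
  congr 1
  refine congrArg₂ _ ?_ (congrArg₂ _ ?_ ?_)
  · exact pv_prefEq _ j
  · rw [pv_amiEq, PySem.Dict.getD_empty]
    rfl
  · rw [pv_cntEq, PySem.Dict.getD_empty]
    rfl
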